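-- pv_equiv track=rewrite | github.com/NikosSmyrnakis/Festival_Database | data_creator2304.py | is_violation_of_3_consecutive_years
-- ===== SOURCE A (Python) =====
-- def is_violation_of_3_consecutive_years(existing_years, new_year):
--     years = sorted(set(existing_years + [new_year]))
--     count = 1
--     for i in range(1, len(years)):
--         if years[i] == years[i - 1] + 1:
--             count += 1
--             if count > 3:
--                 return True
--         else:
--             count = 1
--     return False
-- ===== SOURCE B (Python) =====
-- def is_violation_of_3_consecutive_years(existing_years, new_year):
--     s = set(existing_years)
--     s.add(new_year)
--     return any(x + 1 in s and x + 2 in s and x + 3 in s for x in s)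
-- ===== Notes on version B (the rewrite author's own statement) =====
-- stated objective: alternative
-- what changed: Replaced sort-then-scan-for-a-run-of-4 with a hash-set membership test: any element x with x+1, x+2, x+3 all in the set.
import Mathlib
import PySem

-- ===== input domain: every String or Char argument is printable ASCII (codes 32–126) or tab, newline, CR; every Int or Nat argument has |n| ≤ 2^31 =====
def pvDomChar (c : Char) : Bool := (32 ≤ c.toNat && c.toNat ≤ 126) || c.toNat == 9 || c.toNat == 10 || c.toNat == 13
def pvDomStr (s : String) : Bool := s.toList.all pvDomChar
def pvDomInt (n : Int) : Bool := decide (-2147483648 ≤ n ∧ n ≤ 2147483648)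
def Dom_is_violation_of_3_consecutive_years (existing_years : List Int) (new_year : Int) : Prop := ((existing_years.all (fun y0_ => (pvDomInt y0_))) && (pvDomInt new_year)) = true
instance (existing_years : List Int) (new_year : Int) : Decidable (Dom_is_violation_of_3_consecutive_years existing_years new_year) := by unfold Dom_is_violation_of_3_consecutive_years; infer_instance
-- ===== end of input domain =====

-- B replaces A's sort-then-scan-for-a-run-of-4 with a hash-set membership test
-- (any x in the set with x+1, x+2, x+3 also in the set); alternative algorithm, same result.

-- ===== PORT A =====
-- the 'for i in range(1, len(years))' loop, reading years[i] and years[i-1],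
-- as the obvious structural recursion over (previous element, rest, count)
def pvLoopA : Int → List Int → Int → Bool
  | _, [], _ => false
  | prev, y :: rest, count =>
    if y = prev + 1 then
      if count + 1 > 3 then true else pvLoopA y rest (count + 1)
    else pvLoopA y rest 1

def is_violation_of_3_consecutive_years (existing_years : List Int) (new_year : Int) : Bool :=
  let years := PySem.List.sorted (PySem.Set.ofList (existing_years ++ [new_year])) (fun x => x) false
  match years with
  | [] => false
  | h :: t => pvLoopA h t 1

-- ===== PORT B =====
def is_violation_of_3_consecutive_years_alt (existing_years : List Int) (new_year : Int) : Bool :=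
  let s := PySem.Set.add (PySem.Set.ofList existing_years) new_year
  s.any (fun x => PySem.Set.contains s (x + 1) && PySem.Set.contains s (x + 2) && PySem.Set.contains s (x + 3))

-- ===== PRECONDITION & SPEC =====
def Spec_is_violation_of_3_consecutive_years (existing_years : List Int) (new_year : Int) (out : Bool) : Prop := out = is_violation_of_3_consecutive_years_alt existing_years new_year
instance (existing_years : List Int) (new_year : Int) (out : Bool) : Decidable (Spec_is_violation_of_3_consecutive_years existing_years new_year out) := by unfold Spec_is_violation_of_3_consecutive_years; infer_instance

-- ===== CLAIM (what is proved, stated in full; the proofs are below) =====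
def Claim_equal_is_violation_of_3_consecutive_years : Prop := ∀ (existing_years : List Int) (new_year : Int), Dom_is_violation_of_3_consecutive_years existing_years new_year → Spec_is_violation_of_3_consecutive_years existing_years new_year (is_violation_of_3_consecutive_years existing_years new_year)

-- ===== LEMMAS AND PROOFS =====

-- "the first k elements of t are p+1, p+2, …, p+k"
def pvRun : Int → List Int → Nat → Prop
  | _, _, 0 => True
  | p, y :: r, Nat.succ k => y = p + 1 ∧ pvRun y r k
  | _, [], Nat.succ _ => False

-- "some suffix of L starts with 4 consecutive integers"
def pvHasRun : List Int → Prop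
  | [] => False
  | p :: t => pvRun p t 3 ∨ pvHasRun t

theorem pvRun_zero (p : Int) (t : List Int) : pvRun p t 0 = True := by cases t <;> rfl

theorem pvRun_succ_cons (p y : Int) (r : List Int) (k : Nat) :
    pvRun p (y :: r) (k + 1) = (y = p + 1 ∧ pvRun y r k) := rfl

theorem pvRun_succ_nil (p : Int) (k : Nat) : pvRun p [] (k + 1) = False := rfl

theorem pvHasRun_cons (p : Int) (t : List Int) :
    pvHasRun (p :: t) = (pvRun p t 3 ∨ pvHasRun t) := rfl

theorem pvRun_mono : ∀ (k j : Nat) (p : Int) (t : List Int), j ≤ k → pvRun p t k → pvRun p t j := by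
  intro k
  induction k with
  | zero => intro j p t hj _; interval_cases j; rw [pvRun_zero]; trivial
  | succ k ih =>
    intro j p t hj hr
    cases j with
    | zero => rw [pvRun_zero]; trivial
    | succ j =>
      cases t with
      | nil => rw [pvRun_succ_nil] at hr; cases hr
      | cons y r =>
        rw [pvRun_succ_cons] at hr ⊢
        exact ⟨hr.1, ih j y r (Nat.succ_le_succ_iff.mp hj) hr.2⟩

theorem pvLoopA_iff : ∀ (t : List Int) (prev : Int) (k : Nat), 1 ≤ k → k ≤ 3 →
    (pvLoopA prev t ((4 : Int) - k) = true ↔ pvRun prev t k ∨ pvHasRun (prev :: t)) := by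
  intro t
  induction t with
  | nil =>
    intro prev k h1 h3
    obtain ⟨k', rfl⟩ : ∃ k', k = k' + 1 := ⟨k - 1, by omega⟩
    simp only [pvLoopA, pvRun_succ_nil, pvHasRun]
    simp
  | cons y rest ih =>
    intro prev k h1 h3
    obtain ⟨k', rfl⟩ : ∃ k', k = k' + 1 := ⟨k - 1, by omega⟩
    rw [pvHasRun_cons, pvRun_succ_cons, pvHasRun_cons]
    by_cases hy : y = prev + 1
    · by_cases hk : k' = 0
      · subst hk
        have hT : pvLoopA prev (y :: rest) ((4 : Int) - ((1 : Nat) : Int)) = true := by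
          simp only [pvLoopA, if_pos hy]; norm_num
        rw [hT]
        simp only [true_iff]
        exact Or.inl ⟨hy, by rw [pvRun_zero]; trivial⟩
      · have hstep : pvLoopA prev (y :: rest) ((4 : Int) - ((k' + 1 : Nat) : Int)) =
            pvLoopA y rest ((4 : Int) - ((k' : Nat) : Int)) := by
          simp only [pvLoopA, if_pos hy]
          have hle : ¬ ((4 : Int) - ((k' + 1 : Nat) : Int) + 1 > 3) := by push_cast; omega
          rw [if_neg hle]
          congr 1
          push_cast
          ring
        rw [hstep, ih y k' (by omega) (by omega), pvHasRun_cons, pvRun_succ_cons]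
        have m32 := pvRun_mono 3 2 y rest (by omega)
        have m3k := pvRun_mono 3 k' y rest (by omega)
        have m2k := pvRun_mono 2 k' y rest (by omega)
        tauto
    · have hstep : pvLoopA prev (y :: rest) ((4 : Int) - ((k' + 1 : Nat) : Int)) =
          pvLoopA y rest ((4 : Int) - ((3 : Nat) : Int)) := by
        simp only [pvLoopA, if_neg hy]; norm_num
      rw [hstep, ih y 3 (by omega) (by omega), pvHasRun_cons,
        show pvRun prev (y :: rest) 3 = (y = prev + 1 ∧ pvRun y rest 2) from rfl]
      tauto

-- entry point of A's loop in terms of pvHasRun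
theorem pvA_iff (L : List Int) :
    (match L with | [] => false | h :: t => pvLoopA h t 1) = true ↔ pvHasRun L := by
  cases L with
  | nil => simp [pvHasRun]
  | cons h t =>
    have h3 := pvLoopA_iff t h 3 (by omega) (le_refl 3)
    norm_num at h3
    rw [show (1 : Int) = 4 - ((3 : Nat) : Int) by norm_num]
    rw [pvLoopA_iff t h 3 (by omega) (le_refl 3), pvHasRun_cons]
    constructor
    · rintro (h | h | h)
      · exact Or.inl h
      · exact Or.inl h
      · exact Or.inr h
    · rintro (h | h)
      · exact Or.inl h
      · exact Or.inr (Or.inr h)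

theorem pvHasRun_mem {L : List Int} (h : pvHasRun L) :
    ∃ x, x ∈ L ∧ x + 1 ∈ L ∧ x + 2 ∈ L ∧ x + 3 ∈ L := by
  induction L with
  | nil => cases h
  | cons p t ih =>
    rw [pvHasRun_cons] at h
    rcases h with hr | ht
    · match t, hr with
      | y1 :: y2 :: y3 :: r, ⟨e1, e2, e3, _⟩ =>
        refine ⟨p, List.mem_cons_self, ?_, ?_, ?_⟩ <;> simp_all <;> omega
    · obtain ⟨x, h0, h1, h2, h3⟩ := ih ht
      exact ⟨x, .tail _ h0, .tail _ h1, .tail _ h2, .tail _ h3⟩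

-- in a strictly increasing list, h+1 ∈ h::t forces t to start with h+1
theorem pvAdj {h : Int} {t : List Int} (hs : List.Pairwise (· < ·) (h :: t))
    (hm : h + 1 ∈ h :: t) : ∃ t', t = (h + 1) :: t' := by
  rcases List.mem_cons.mp hm with he | ht
  · omega
  · cases t with
    | nil => cases ht
    | cons a t' =>
      rcases List.mem_cons.mp ht with he | ht'
      · exact ⟨t', by rw [he]⟩
      · have h1 : h < a := (List.pairwise_cons.mp hs).1 a List.mem_cons_self
        have h2 : a < h + 1 := (List.pairwise_cons.mp ((List.pairwise_cons.mp hs).2)).1 _ ht'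
        omega

theorem pvMem_hasRun : ∀ (L : List Int), List.Pairwise (· < ·) L →
    ∀ x, x ∈ L → x + 1 ∈ L → x + 2 ∈ L → x + 3 ∈ L → pvHasRun L := by
  intro L
  induction L with
  | nil => intro _ x h0; cases h0
  | cons h t ih =>
    intro hs x h0 h1 h2 h3
    rw [pvHasRun_cons]
    by_cases hx : x = h
    · subst hx
      obtain ⟨t1, ht1⟩ := pvAdj hs h1
      subst ht1
      have hs1 : List.Pairwise (· < ·) ((x + 1) :: t1) := (List.pairwise_cons.mp hs).2
      have h2' : x + 2 ∈ (x + 1) :: t1 := by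
        rcases List.mem_cons.mp h2 with he | hm
        · omega
        · exact hm
      obtain ⟨t2, ht2⟩ := pvAdj hs1 (by rwa [show x + 1 + 1 = x + 2 by ring])
      rw [show x + 1 + 1 = x + 2 by ring] at ht2
      subst ht2
      have hs2 : List.Pairwise (· < ·) ((x + 2) :: t2) := (List.pairwise_cons.mp hs1).2
      have h3' : x + 3 ∈ (x + 2) :: t2 := by
        rcases List.mem_cons.mp h3 with he | hm
        · omega
        · rcases List.mem_cons.mp hm with he | hm
          · omega
          · exact hm
      obtain ⟨t3, ht3⟩ := pvAdj hs2 (by rwa [show x + 2 + 1 = x + 3 by ring])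
      rw [show x + 2 + 1 = x + 3 by ring] at ht3
      subst ht3
      refine Or.inl ?_
      rw [pvRun_succ_cons, pvRun_succ_cons, pvRun_succ_cons, pvRun_zero]
      exact ⟨rfl, by ring, by ring, trivial⟩
    · have hxt : x ∈ t := by
        rcases List.mem_cons.mp h0 with he | hm
        · exact absurd he hx
        · exact hm
      have hlt : h < x := (List.pairwise_cons.mp hs).1 x hxt
      have mt : ∀ z : Int, h < z → z ∈ h :: t → z ∈ t := by
        intro z hz hmz
        rcases List.mem_cons.mp hmz with he | hm
        · omega
        · exact hm
      exact Or.inr (ih (List.pairwise_cons.mp hs).2 x hxt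
        (mt _ (by omega) h1) (mt _ (by omega) h2) (mt _ (by omega) h3))

-- ===== VERDICT (by name: the statement is the Claim_ definition above) =====
theorem is_violation_of_3_consecutive_years_spec : Claim_equal_is_violation_of_3_consecutive_years := by
  intro existing_years new_year _
  unfold Spec_is_violation_of_3_consecutive_years
  unfold is_violation_of_3_consecutive_years is_violation_of_3_consecutive_years_alt
  set L := PySem.List.sorted (PySem.Set.ofList (existing_years ++ [new_year])) (fun x => x) false with hL
  set s := PySem.Set.add (PySem.Set.ofList existing_years) new_year with hs
  have hmem : ∀ z : Int, z ∈ L ↔ z ∈ s := by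
    intro z
    rw [hL, hs, PySem.List.mem_sorted, PySem.Set.mem_ofList, PySem.Set.mem_add,
      PySem.Set.mem_ofList, List.mem_append, List.mem_singleton]
  have hsorted : List.Pairwise (· < ·) L := PySem.List.sorted_ofList_pairwise_lt _
  rw [Bool.eq_iff_iff]
  rw [pvA_iff L]
  rw [List.any_eq_true]
  constructor
  · intro h
    obtain ⟨x, h0, h1, h2, h3⟩ := pvHasRun_mem h
    refine ⟨x, (hmem x).mp h0, ?_⟩
    simp only [Bool.and_eq_true, PySem.Set.contains_iff]
    exact ⟨⟨(hmem _).mp h1, (hmem _).mp h2⟩, (hmem _).mp h3⟩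
  · rintro ⟨x, hx, hb⟩
    simp only [Bool.and_eq_true, PySem.Set.contains_iff] at hb
    exact pvMem_hasRun L hsorted x ((hmem x).mpr hx)
      ((hmem _).mpr hb.1.1) ((hmem _).mpr hb.1.2) ((hmem _).mpr hb.2)
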